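-- pv_equiv track=rewrite | github.com/GuiMarion/Cryptography | UnknowSource.py | combinatoire
-- ===== SOURCE A (Python) =====
-- def combinatoire(Input, mot):
--     if len(Input) == 0 :
--         if possible(mot):
--             return [mot]
--         else :
--             return ['']
--     Liste = []
--     for elem in Input[0]:
--         if elem not in mot:
--             Liste = Liste + combinatoire(Input[1:], mot+elem)
--     return Liste
--
-- def possible(chaine):
--     for i in range(len(chaine)-1):
--         for e in range(i+1, len(chaine)):
--             if chaine[i] == chaine[e]:
--                 return False
--     return True
-- ===== SOURCE B (Python) =====
-- def combinatoire(Input, mot):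
--     partials = [mot]
--     for L in Input:
--         partials = [p + e for p in partials for e in L if e not in p]
--     return [p if possible(p) else '' for p in partials]
--
-- def possible(chaine):
--     return len(set(chaine)) == len(chaine)
-- ===== Notes on version B (the rewrite author's own statement) =====
-- stated objective: alternative
-- what changed: Replaces A's recursion on Input (one recursive call per kept element) by an iterative level-by-level expansion of the list of partial words, and replaces the nested-index-loop duplicate test possible() by a set-size comparison len(set(chaine)) == len(chaine).
import Mathlib
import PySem

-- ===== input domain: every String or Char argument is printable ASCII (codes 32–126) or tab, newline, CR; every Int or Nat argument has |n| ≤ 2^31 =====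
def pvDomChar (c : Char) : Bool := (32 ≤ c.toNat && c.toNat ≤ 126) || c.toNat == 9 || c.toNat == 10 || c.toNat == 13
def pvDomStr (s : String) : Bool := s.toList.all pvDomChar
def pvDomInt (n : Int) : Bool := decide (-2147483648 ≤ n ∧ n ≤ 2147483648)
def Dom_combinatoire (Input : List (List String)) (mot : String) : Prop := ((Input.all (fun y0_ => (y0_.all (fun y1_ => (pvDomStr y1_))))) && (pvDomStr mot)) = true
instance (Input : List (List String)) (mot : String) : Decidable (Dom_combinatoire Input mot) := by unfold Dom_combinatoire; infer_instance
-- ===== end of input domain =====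

-- B replaces A's recursion by an iterative level-by-level expansion of the partial words
-- (and the nested-loop duplicate test by a set-size comparison); objective: alternative decomposition, same output.

-- ===== PORT A =====
-- possible(chaine): nested index loops, early False on a repeated character
def possibleA (chaine : String) : Bool :=
  (PySem.List.pyRange 0 (PySem.Str.len chaine - 1) 1).all fun i =>
    (PySem.List.pyRange (i + 1) (PySem.Str.len chaine) 1).all fun e =>
      !(PySem.Str.pyGet? chaine i == PySem.Str.pyGet? chaine e)

def combinatoire (Input : List (List String)) (mot : String) : List String :=
  match Input with
  | [] => if possibleA mot then [mot] else [""]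
  | L :: rest =>
      -- Liste = []; for elem in Input[0]: if elem not in mot: Liste = Liste + combinatoire(Input[1:], mot+elem)
      L.foldl (fun Liste elem =>
        if !(PySem.Str.isIn elem mot) then Liste ++ combinatoire rest (mot ++ elem) else Liste) []

-- ===== PORT B =====
-- possible(chaine) in B: len(set(chaine)) == len(chaine)
def possibleB (chaine : String) : Bool :=
  PySem.Set.len (PySem.Set.ofList chaine.toList) == PySem.Str.len chaine

def combinatoire_alt (Input : List (List String)) (mot : String) : List String :=
  -- partials = [mot]; for L in Input: partials = [p + e for p in partials for e in L if e not in p]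
  (Input.foldl
      (fun partials L =>
        partials.flatMap fun p =>
          (L.filter fun e => !(PySem.Str.isIn e p)).map fun e => p ++ e)
      [mot]).map
    fun p => if possibleB p then p else ""

-- ===== PRECONDITION & SPEC =====
def Spec_combinatoire (Input : List (List String)) (mot : String) (out : List String) : Prop := out = combinatoire_alt Input mot
instance (Input : List (List String)) (mot : String) (out : List String) : Decidable (Spec_combinatoire Input mot out) := by unfold Spec_combinatoire; infer_instance

-- ===== CLAIM (what is proved, stated in full; the proofs are below) =====
def Claim_equal_combinatoire : Prop := ∀ (Input : List (List String)) (mot : String), Dom_combinatoire Input mot → Spec_combinatoire Input mot (combinatoire Input mot)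

-- ===== LEMMAS AND PROOFS =====

-- PySem.Set.ofList is a sublist of its argument
theorem pvOfList_sublist {α : Type} [DecidableEq α] (xs : List α) :
    (PySem.Set.ofList xs : List α).Sublist xs := by
  induction xs with
  | nil => simp [PySem.Set.ofList_nil]
  | cons x xs ih =>
      rw [PySem.Set.ofList_cons]
      refine List.Sublist.cons₂ x (List.Sublist.trans ?_ ih)
      simp only [PySem.Set.discard]
      exact List.filter_sublist

theorem pvPossB_iff (s : String) : possibleB s = true ↔ s.toList.Nodup := by
  unfold possibleB
  constructor
  · intro h
    have hlen : (PySem.Set.ofList s.toList : List Char).length = s.toList.length := by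
      simp [PySem.Set.len, PySem.Str.len] at h
      exact_mod_cast h
    have := List.Sublist.eq_of_length (pvOfList_sublist s.toList) hlen
    rw [← this]
    exact PySem.Set.nodup_ofList s.toList
  · intro h
    rw [PySem.Set.ofList_eq_self_of_nodup _ h]
    simp [PySem.Set.len, PySem.Str.len]

theorem pvPossA_iff (s : String) : possibleA s = true ↔ s.toList.Nodup := by
  unfold possibleA
  simp only [List.all_eq_true, PySem.List.mem_pyRange_one]
  rw [List.nodup_iff_getElem?_ne_getElem?]
  constructor
  · intro h i j hij hj
    have h1 : (0 : Int) ≤ (i : Int) ∧ (i : Int) < PySem.Str.len s - 1 := by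
      rw [PySem.Str.len_eq]; omega
    have h2 : (i : Int) + 1 ≤ (j : Int) ∧ (j : Int) < PySem.Str.len s := by
      rw [PySem.Str.len_eq]; omega
    have := h (i : Int) h1 (j : Int) h2
    simp only [PySem.Str.pyGet?_eq, PySem.Chars.pyGet?, PySem.List.pyGet?_natCast] at this
    intro hcontra
    rw [hcontra] at this
    simp at this
  · intro h i hi e he
    have hi0 : (0 : Int) ≤ i := hi.1
    have he0 : (0 : Int) ≤ e := by omega
    obtain ⟨i', rfl⟩ := Int.eq_ofNat_of_zero_le hi0
    obtain ⟨e', rfl⟩ := Int.eq_ofNat_of_zero_le he0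
    have hlt : i' < e' := by exact_mod_cast (by omega : (i' : Int) < (e' : Int))
    have hlen : e' < s.toList.length := by
      have := he.2; rw [PySem.Str.len_eq] at this; exact_mod_cast this
    have := h i' e' hlt hlen
    simp only [PySem.Str.pyGet?_eq, PySem.Chars.pyGet?, PySem.List.pyGet?_natCast]
    simpa using this

theorem pvPoss_eq (s : String) : possibleA s = possibleB s := by
  have ha := pvPossA_iff s
  have hb := pvPossB_iff s
  cases h1 : possibleA s <;> cases h2 : possibleB s <;> simp_all

-- A's loop over Input[0] as a flatMap over the kept elements
theorem pvA_cons (L : List String) (rest : List (List String)) (mot : String) :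
    combinatoire (L :: rest) mot =
      (L.filter fun e => !(PySem.Str.isIn e mot)).flatMap fun e => combinatoire rest (mot ++ e) := by
  show L.foldl (fun Liste elem =>
      if !(PySem.Str.isIn elem mot) then Liste ++ combinatoire rest (mot ++ elem) else Liste) [] = _
  rw [PySem.List.foldl_congr_mem' L
      (fun Liste elem => if !(PySem.Str.isIn elem mot) then Liste ++ combinatoire rest (mot ++ elem) else Liste)
      (fun Liste elem => Liste ++ (if !(PySem.Str.isIn elem mot) then combinatoire rest (mot ++ elem) else []))
      [] (by intro x _ acc; dsimp only; split <;> simp)]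
  rw [PySem.List.foldl_append_eq_flatMap]
  simp only [List.nil_append]
  induction L with
  | nil => rfl
  | cons x xs ih => cases h : PySem.Chars.isIn x.toList mot.toList <;> simp [h] <;> simpa using ih

-- the iterative expansion, mapped through the finaliser, equals the flatMap of A's recursion
theorem pvMain (Input : List (List String)) :
    ∀ ps : List String,
      ((Input.foldl
          (fun partials L =>
            partials.flatMap fun p =>
              (L.filter fun e => !(PySem.Str.isIn e p)).map fun e => p ++ e)
          ps).map fun p => if possibleB p then p else "")
        = ps.flatMap fun p => combinatoire Input p := by
  induction Input with
  | nil =>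
      intro ps
      simp only [List.foldl_nil]
      have : ∀ p : String, combinatoire [] p = [if possibleB p then p else ""] := by
        intro p
        show (if possibleA p then [p] else [""]) = _
        rw [pvPoss_eq]; split <;> simp_all
      simp [this, List.flatMap]
      induction ps with
      | nil => rfl
      | cons q qs ihq => simp [ihq]
  | cons L rest ih =>
      intro ps
      simp only [List.foldl_cons]
      rw [ih]
      rw [List.flatMap_assoc]
      congr 1
      funext p
      rw [List.flatMap_map, pvA_cons]

-- ===== VERDICT (by name: the statement is the Claim_ definition above) =====
theorem combinatoire_spec : Claim_equal_combinatoire := by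
  intro Input mot _
  unfold Spec_combinatoire combinatoire_alt
  rw [pvMain Input [mot]]
  simp
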